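-- pv_equiv track=rewrite | github.com/khelwood/advent-of-code | 2025/d08_junction.py | iter_connections
-- ===== SOURCE A (Python) =====
-- def iter_connections(dists):
--     rdist = {}
--     for k,v in dists.items():
--         if v in rdist:
--             rdist[v].append(k)
--         else:
--             rdist[v] = [k]
--     dsort = sorted(rdist)
--     for d in dsort:
--         pairs = rdist[d]
--         for p in pairs:
--             yield p
-- ===== SOURCE B (Python) =====
-- def iter_connections(dists):
--     for k, _ in sorted(dists.items(), key=lambda item: item[1]):
--         yield k
-- ===== Notes on version B (the rewrite author's own statement) =====
-- stated objective: idiomatic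
-- what changed: A builds a reverse dict grouping keys by distance, sorts the distinct distances and walks the buckets in a two-level pass; B keeps no auxiliary structure and does one flat stable sort of the items by value, relying on sort stability to keep insertion order within equal distances.
import Mathlib
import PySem

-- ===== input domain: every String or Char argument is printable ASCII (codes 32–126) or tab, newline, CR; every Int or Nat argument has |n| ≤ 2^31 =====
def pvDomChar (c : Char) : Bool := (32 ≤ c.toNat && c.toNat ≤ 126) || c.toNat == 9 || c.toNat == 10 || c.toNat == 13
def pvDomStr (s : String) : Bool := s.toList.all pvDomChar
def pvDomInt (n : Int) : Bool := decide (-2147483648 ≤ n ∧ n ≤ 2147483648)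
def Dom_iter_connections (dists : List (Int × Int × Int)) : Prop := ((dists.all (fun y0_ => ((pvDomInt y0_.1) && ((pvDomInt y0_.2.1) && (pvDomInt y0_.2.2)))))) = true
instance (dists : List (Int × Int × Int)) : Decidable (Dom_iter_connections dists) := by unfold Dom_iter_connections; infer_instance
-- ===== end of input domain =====

-- B replaces A's reverse/grouping dict and two-level bucket walk by one flat stable
-- sort of the items by their value (same O(n log n) cost, idiomatic).
-- dists : dict[(int,int), int] as a list of triples (k1, k2, v) in insertion order.

-- ===== PORT A =====
def iter_connections (dists : List (Int × Int × Int)) : List (Int × Int) :=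
  -- rdist = {}; for k,v in dists.items(): if v in rdist: rdist[v].append(k) else: rdist[v] = [k]
  let rdist : PySem.Dict Int (List (Int × Int)) :=
    dists.foldl (fun r y =>
      if r.contains y.2.2 then r.modify y.2.2 [] (fun b => b ++ [(y.1, y.2.1)])
      else r.insert y.2.2 [(y.1, y.2.1)]) PySem.Dict.empty
  -- dsort = sorted(rdist)
  let dsort := PySem.List.sorted rdist.keys (fun d => d) false
  -- for d in dsort: pairs = rdist[d]; for p in pairs: yield p
  -- rdist[d]: every d ∈ dsort is a key of rdist, so getD is exact here (no KeyError possible)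
  dsort.foldl (fun acc d => acc ++ rdist.getD d []) []

-- ===== PORT B =====
def iter_connections_alt (dists : List (Int × Int × Int)) : List (Int × Int) :=
  -- for k, _ in sorted(dists.items(), key=lambda item: item[1]): yield k
  (PySem.List.sorted dists (fun y => y.2.2) false).map (fun y => (y.1, y.2.1))

-- ===== PRECONDITION & SPEC =====
def Spec_iter_connections (dists : List (Int × Int × Int)) (out : List (Int × Int)) : Prop := out = iter_connections_alt dists
instance (dists : List (Int × Int × Int)) (out : List (Int × Int)) : Decidable (Spec_iter_connections dists out) := by unfold Spec_iter_connections; infer_instance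

-- ===== CLAIM (what is proved, stated in full; the proofs are below) =====
def Claim_equal_iter_connections : Prop := ∀ (dists : List (Int × Int × Int)), Dom_iter_connections dists → Spec_iter_connections dists (iter_connections dists)

-- ===== LEMMAS AND PROOFS =====

-- the "grouped" form: distinct values in ascending order, each value's group in list order
def pvGrp {α : Type} (key : α → Int) (l : List α) : List α :=
  (PySem.List.sorted (PySem.Set.ofList (l.map key)) (fun d => d) false).flatMap
    (fun d => l.filter (fun y => key y == d))

-- insertion into a key-sorted list lands after all elements of key ≤ key y
theorem pv_insertBy_sorted {α : Type} (key : α → Int) (y : α) (acc : List α)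
    (h : acc.Pairwise (fun a b => key a ≤ key b)) :
    PySem.List.insertBy (fun a b => decide (key a < key b)) y acc =
      acc.filter (fun a => decide (key a ≤ key y)) ++ y :: acc.filter (fun a => decide (key y < key a)) := by
  induction acc with
  | nil => simp [PySem.List.insertBy]
  | cons a t ih =>
    rcases List.pairwise_cons.mp h with ⟨h1, ht⟩
    by_cases hlt : key y < key a
    · have hf1 : List.filter (fun b => decide (key b ≤ key y)) (a :: t) = [] := by
        rw [List.filter_eq_nil_iff]
        intro b hb
        simp only [decide_eq_true_eq, not_le]
        rcases List.mem_cons.mp hb with rfl | hb'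
        · omega
        · have := h1 b hb'; omega
      have hf2 : List.filter (fun b => decide (key y < key b)) (a :: t) = a :: t := by
        rw [List.filter_eq_self]
        intro b hb
        simp only [decide_eq_true_eq]
        rcases List.mem_cons.mp hb with rfl | hb'
        · omega
        · have := h1 b hb'; omega
      rw [hf1, hf2]
      simp [PySem.List.insertBy, hlt]
    · have ha : (decide (key a ≤ key y)) = true := by simp only [decide_eq_true_eq]; omega
      have hb : (decide (key y < key a)) = false := by simp only [decide_eq_false_iff_not]; omega
      rw [List.filter_cons, List.filter_cons, ha, hb]
      simp only [if_true, Bool.false_eq_true, if_false]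
      have : PySem.List.insertBy (fun a b => decide (key a < key b)) y (a :: t) =
          a :: PySem.List.insertBy (fun a b => decide (key a < key b)) y t := by
        simp [PySem.List.insertBy, hb]
      rw [this, ih ht]
      simp

-- a strictly ascending list's ≤-filter is its <-filter plus the pivot if present
theorem pv_filter_le_eq {v : Int} (ds : List Int) (h : ds.Pairwise (· < ·)) :
    ds.filter (fun d => decide (d ≤ v)) =
      ds.filter (fun d => decide (d < v)) ++ (if v ∈ ds then [v] else []) := by
  induction ds with
  | nil => simp
  | cons a t ih =>
    rcases List.pairwise_cons.mp h with ⟨h1, ht⟩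
    rcases lt_trichotomy a v with hav | heq | hav
    · have hmem : (if v ∈ a :: t then [v] else []) = (if v ∈ t then [v] else []) := by
        by_cases hv : v ∈ t
        · simp [hv, List.mem_cons]
        · simp [hv, List.mem_cons]; omega
      rw [List.filter_cons, List.filter_cons]
      simp only [decide_eq_true_eq]
      rw [if_pos (le_of_lt hav), if_pos hav, hmem, ih ht]
      simp
    · subst heq
      rw [List.filter_cons, List.filter_cons]
      simp only [decide_eq_true_eq]
      rw [if_pos le_rfl, if_neg (lt_irrefl a)]
      rw [List.filter_eq_nil_iff.mpr (by intro b hb; simp only [decide_eq_true_eq]; have := h1 b hb; omega),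
          List.filter_eq_nil_iff.mpr (by intro b hb; simp only [decide_eq_true_eq]; have := h1 b hb; omega),
          if_pos (List.mem_cons_self)]
      simp
    · have h2 : ∀ b ∈ a :: t, ¬ b ≤ v := by
        intro b hb
        rcases List.mem_cons.mp hb with rfl | hb'
        · omega
        · have := h1 b hb'; omega
      have hnm : v ∉ a :: t := fun hv => h2 v hv le_rfl
      rw [List.filter_eq_nil_iff.mpr (by intro b hb; simp only [decide_eq_true_eq]; exact h2 b hb),
          List.filter_eq_nil_iff.mpr (by intro b hb; simp only [decide_eq_true_eq]; have := h2 b hb; omega),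
          if_neg hnm]
      simp

-- the grouped form is key-sorted
theorem pv_grp_pairwise {α : Type} (key : α → Int) (l : List α) :
    (pvGrp key l).Pairwise (fun a b => key a ≤ key b) := by
  unfold pvGrp
  rw [List.pairwise_flatMap]
  constructor
  · intro d _
    apply List.pairwise_of_forall_mem_list
    intro a ha b hb
    have ha' := (List.mem_filter.mp ha).2
    have hb' := (List.mem_filter.mp hb).2
    simp only [beq_iff_eq] at ha' hb'
    omega
  · have hp := PySem.List.sorted_ofList_pairwise_lt (l.map key)
    refine hp.imp ?_
    intro d1 d2 h12 x hx y hy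
    have hx' := (List.mem_filter.mp hx).2
    have hy' := (List.mem_filter.mp hy).2
    simp only [beq_iff_eq] at hx' hy'
    omega

-- naming sorted(set(vals + [v])): the <v part, then v, then the >v part
theorem pv_sorted_ofList_snoc (vals : List Int) (v : Int) :
    PySem.List.sorted (PySem.Set.ofList (vals ++ [v])) (fun d => d) false =
      (PySem.List.sorted (PySem.Set.ofList vals) (fun d => d) false).filter (fun d => decide (d < v)) ++
      v :: (PySem.List.sorted (PySem.Set.ofList vals) (fun d => d) false).filter (fun d => decide (v < d)) := by
  set sv := PySem.List.sorted (PySem.Set.ofList vals) (fun d => d) false with hsv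
  set ys := sv.filter (fun d => decide (d < v)) ++ v :: sv.filter (fun d => decide (v < d)) with hys
  have hsvp : sv.Pairwise (· < ·) := PySem.List.sorted_ofList_pairwise_lt vals
  have hmem_sv : ∀ x, x ∈ sv ↔ x ∈ vals := by
    intro x
    rw [hsv, PySem.List.mem_sorted, PySem.Set.mem_ofList]
  have hysp : ys.Pairwise (· < ·) := by
    rw [hys, List.pairwise_append]
    refine ⟨hsvp.filter _, ?_, ?_⟩
    · rw [List.pairwise_cons]
      refine ⟨?_, hsvp.filter _⟩
      intro b hb
      have := (List.mem_filter.mp hb).2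
      simpa using this
    · intro a ha b hb
      have ha' := (List.mem_filter.mp ha).2
      simp only [decide_eq_true_eq] at ha'
      rcases List.mem_cons.mp hb with rfl | hb'
      · exact ha'
      · have hb'' := (List.mem_filter.mp hb').2
        simp only [decide_eq_true_eq] at hb''
        omega
  have hmem_ys : ∀ x, x ∈ ys ↔ (x ∈ vals ∨ x = v) := by
    intro x
    rw [hys]
    simp only [List.mem_append, List.mem_cons, List.mem_filter, decide_eq_true_eq, hmem_sv]
    constructor
    · rintro (⟨hx, _⟩ | rfl | ⟨hx, _⟩) <;> tauto
    · rintro (hx | rfl)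
      · rcases lt_trichotomy x v with h | rfl | h <;> tauto
      · tauto
  have hmem_t : ∀ x, x ∈ PySem.Set.ofList (vals ++ [v]) ↔ (x ∈ vals ∨ x = v) := by
    intro x
    rw [PySem.Set.mem_ofList]
    simp
  apply PySem.List.sorted_eq_of_perm_of_pairwise_lt
  · apply List.Subperm.antisymm
    · have hnd : ys.Nodup := hysp.imp ne_of_lt
      exact List.subperm_of_subset hnd (fun x hx => (hmem_t x).mpr ((hmem_ys x).mp hx))
    · exact List.subperm_of_subset (PySem.Set.nodup_ofList _) (fun x hx => (hmem_ys x).mpr ((hmem_t x).mp hx))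
  · exact hysp

-- a key-level filter commutes with the grouped flatMap
theorem pv_flatMap_filter_key {α : Type} (key : α → Int) (l : List α) (P : Int → Bool) (ds : List Int) :
    (ds.flatMap (fun d => l.filter (fun y => key y == d))).filter (fun a => P (key a)) =
      (ds.filter P).flatMap (fun d => l.filter (fun y => key y == d)) := by
  induction ds with
  | nil => simp
  | cons d ds ih =>
    rw [List.flatMap_cons, List.filter_append, ih, List.filter_cons]
    by_cases hP : P d = true
    · rw [if_pos hP, List.flatMap_cons]
      congr 1
      rw [List.filter_eq_self]
      intro a ha
      have := (List.mem_filter.mp ha).2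
      simp only [beq_iff_eq] at this
      rw [this]; exact hP
    · rw [if_neg hP]
      have : (l.filter (fun y => key y == d)).filter (fun a => P (key a)) = [] := by
        rw [List.filter_eq_nil_iff]
        intro a ha
        have := (List.mem_filter.mp ha).2
        simp only [beq_iff_eq] at this
        rw [this]
        simpa using hP
      rw [this, List.nil_append]

-- the heart: a stable sort by an Int key is the ascending concatenation of the value groups
theorem pv_sorted_eq_grp {α : Type} (key : α → Int) (l : List α) :
    PySem.List.sorted l key false = pvGrp key l := by
  induction l using List.reverseRecOn with
  | nil => rfl
  | append_singleton l y ih =>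
    have h1 : PySem.List.sorted (l ++ [y]) key false =
        PySem.List.insertBy (fun a b => decide (key a < key b)) y (PySem.List.sorted l key false) := by
      rw [PySem.List.sorted_eq_foldl_insertBy, PySem.List.sorted_eq_foldl_insertBy, List.foldl_append]
      rfl
    rw [h1, ih, pv_insertBy_sorted key y _ (pv_grp_pairwise key l)]
    have hsvmem : ∀ x, x ∈ PySem.List.sorted (PySem.Set.ofList (l.map key)) (fun d => d) false ↔ x ∈ l.map key := by
      intro x; rw [PySem.List.mem_sorted, PySem.Set.mem_ofList]
    set sv := PySem.List.sorted (PySem.Set.ofList (l.map key)) (fun d => d) false with hsv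
    have hsvp : sv.Pairwise (· < ·) := PySem.List.sorted_ofList_pairwise_lt _
    -- RHS: unfold the grouped form of l ++ [y]
    have hmap : (l ++ [y]).map key = l.map key ++ [key y] := by simp
    have hA : (sv.filter (fun d => decide (d < key y))).flatMap (fun d => (l ++ [y]).filter (fun z => key z == d)) =
        (sv.filter (fun d => decide (d < key y))).flatMap (fun d => l.filter (fun z => key z == d)) := by
      apply List.flatMap_congr
      intro d hd
      have hd' := (List.mem_filter.mp hd).2
      simp only [decide_eq_true_eq] at hd'
      have hne : (key y == d) = false := by simp only [beq_eq_false_iff_ne, ne_eq]; omega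
      simp [List.filter_append, hne]
    have hB : (sv.filter (fun d => decide (key y < d))).flatMap (fun d => (l ++ [y]).filter (fun z => key z == d)) =
        (sv.filter (fun d => decide (key y < d))).flatMap (fun d => l.filter (fun z => key z == d)) := by
      apply List.flatMap_congr
      intro d hd
      have hd' := (List.mem_filter.mp hd).2
      simp only [decide_eq_true_eq] at hd'
      have hne : (key y == d) = false := by simp only [beq_eq_false_iff_ne, ne_eq]; omega
      simp [List.filter_append, hne]
    have hMid : (l ++ [y]).filter (fun z => key z == key y) = l.filter (fun z => key z == key y) ++ [y] := by
      simp [List.filter_append]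
    have hrhs : pvGrp key (l ++ [y]) =
        (sv.filter (fun d => decide (d < key y))).flatMap (fun d => l.filter (fun z => key z == d)) ++
        ((l.filter (fun z => key z == key y) ++ [y]) ++
        (sv.filter (fun d => decide (key y < d))).flatMap (fun d => l.filter (fun z => key z == d))) := by
      unfold pvGrp
      rw [hmap, pv_sorted_ofList_snoc, ← hsv, List.flatMap_append, List.flatMap_cons, hA, hB, hMid]
    -- LHS: the two filters of the grouped form of l
    have hle : (pvGrp key l).filter (fun a => decide (key a ≤ key y)) =
        (sv.filter (fun d => decide (d < key y))).flatMap (fun d => l.filter (fun z => key z == d)) ++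
        l.filter (fun z => key z == key y) := by
      unfold pvGrp
      rw [← hsv, pv_flatMap_filter_key key l (fun d => decide (d ≤ key y)) sv,
          pv_filter_le_eq sv hsvp, List.flatMap_append]
      congr 1
      by_cases hv : key y ∈ sv
      · rw [if_pos hv]; simp
      · rw [if_neg hv]
        have : l.filter (fun z => key z == key y) = [] := by
          rw [List.filter_eq_nil_iff]
          intro a ha hk
          exact hv ((hsvmem (key y)).mpr (by simp only [beq_iff_eq] at hk; exact hk ▸ List.mem_map_of_mem ha))
        rw [this]; simp
    have hgt : (pvGrp key l).filter (fun a => decide (key y < key a)) =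
        (sv.filter (fun d => decide (key y < d))).flatMap (fun d => l.filter (fun z => key z == d)) := by
      unfold pvGrp
      rw [← hsv, pv_flatMap_filter_key key l (fun d => decide (key y < d)) sv]
    rw [hle, hgt, hrhs]
    simp [List.append_assoc]

-- A's bucket dict, flattened over its sorted keys, is the grouped form mapped by the projection
theorem pv_portA_eq (dists : List (Int × Int × Int)) :
    iter_connections dists = (pvGrp (fun y => y.2.2) dists).map (fun y => (y.1, y.2.1)) := by
  unfold iter_connections
  -- the if/else step is exactly Dict.modify (append to the bucket, or start it)
  have hstep : dists.foldl (fun r y =>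
      if r.contains y.2.2 then r.modify y.2.2 [] (fun b => b ++ [(y.1, y.2.1)])
      else r.insert y.2.2 [(y.1, y.2.1)]) PySem.Dict.empty =
      dists.foldl (fun r y => r.modify y.2.2 [] (fun b => b ++ [(y.1, y.2.1)])) PySem.Dict.empty := by
    apply PySem.List.foldl_congr_mem
    intro r y _
    by_cases h : r.contains y.2.2
    · rw [if_pos h]
    · rw [if_neg h]
      unfold PySem.Dict.modify
      rw [PySem.Dict.getD_of_not_contains _ _ (by simpa using h)]
      simp
  rw [hstep]
  set r := dists.foldl (fun r y => r.modify y.2.2 [] (fun b => b ++ [(y.1, y.2.1)])) PySem.Dict.empty with hr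
  -- keys of the bucket dict: the distinct values, in first-occurrence order
  have hkeys : r.keys = PySem.Set.ofList (dists.map (fun y => y.2.2)) := by
    rw [hr, PySem.Dict.keys_foldl_modify_key dists (fun y => y.2.2) [] (fun _ y => fun b => b ++ [(y.1, y.2.1)]) PySem.Dict.empty]
    rw [PySem.Dict.keys_empty, PySem.Set.update_eq_append_filter]
    simp [PySem.Set.contains]
  -- each bucket: the keys whose value is d, in insertion order
  have hbucket : ∀ d : Int, r.getD d [] = (dists.filter (fun y => y.2.2 == d)).map (fun y => (y.1, y.2.1)) := by
    intro d
    have hmapfold : r = (dists.map (fun y => (y.2.2, (y.1, y.2.1)))).foldl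
        (fun d p => d.modify p.1 [] (fun b => b ++ [p.2])) PySem.Dict.empty := by
      rw [hr, List.foldl_map]
    rw [hmapfold, PySem.Dict.getD_foldl_modify_append]
    rw [List.filter_map]
    simp [PySem.Dict.getD_empty, List.map_map, Function.comp_def]
  rw [PySem.List.foldl_append_eq_flatMap, List.nil_append, hkeys]
  unfold pvGrp
  rw [List.map_flatMap]
  apply List.flatMap_congr
  intro d _
  exact hbucket d

-- ===== VERDICT (by name: the statement is the Claim_ definition above) =====
theorem iter_connections_spec : Claim_equal_iter_connections := by
  intro dists _
  unfold Spec_iter_connections iter_connections_alt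
  rw [pv_portA_eq, pv_sorted_eq_grp]
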